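-- pv_equiv track=rewrite | github.com/Srinivas-18/VPN-Detection-De-anonymization-Tool | deanon/traffic_flow_correlator.py | _identify_anomalous_patterns
-- ===== SOURCE A (Python) =====
-- from collections import defaultdict, Counter
-- from typing import Dict, List, Tuple, Optional
--
-- def _identify_anomalous_patterns(flow_patterns: Dict) -> List[str]:
--     """Identify flows with anomalous patterns"""
--     anomalous = []
--
--     # Simple anomaly detection based on pattern uniqueness
--     pattern_counts = Counter()
--     for flow_id, pattern in flow_patterns.items():
--         pattern_signature = str(pattern)
--         pattern_counts[pattern_signature] += 1
--
--     # Flows with unique patterns are potentially anomalous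
--     for flow_id, pattern in flow_patterns.items():
--         pattern_signature = str(pattern)
--         if pattern_counts[pattern_signature] == 1:
--             anomalous.append(flow_id)
--
--     return anomalous
-- ===== SOURCE B (Python) =====
-- def _identify_anomalous_patterns(flow_patterns):
--     """Identify flows with anomalous patterns: a flow is anomalous iff no
--     OTHER flow has the same string signature (direct pairwise check, no
--     counting structure)."""
--     items = list(flow_patterns.items())
--     anomalous = []
--     for i, (flow_id, pattern) in enumerate(items):
--         sig = str(pattern)
--         if not any(j != i and str(other) == sig for j, (_fid, other) in enumerate(items)):
--             anomalous.append(flow_id)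
--     return anomalous
-- ===== Notes on version B (the rewrite author's own statement) =====
-- stated objective: alternative
-- what changed: B drops A's Counter pass entirely and decides anomalousness by a direct pairwise check: for each flow it scans all other entries and keeps the flow iff no other entry has the same string signature (nested scan, no auxiliary counting structure).
import Mathlib
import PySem

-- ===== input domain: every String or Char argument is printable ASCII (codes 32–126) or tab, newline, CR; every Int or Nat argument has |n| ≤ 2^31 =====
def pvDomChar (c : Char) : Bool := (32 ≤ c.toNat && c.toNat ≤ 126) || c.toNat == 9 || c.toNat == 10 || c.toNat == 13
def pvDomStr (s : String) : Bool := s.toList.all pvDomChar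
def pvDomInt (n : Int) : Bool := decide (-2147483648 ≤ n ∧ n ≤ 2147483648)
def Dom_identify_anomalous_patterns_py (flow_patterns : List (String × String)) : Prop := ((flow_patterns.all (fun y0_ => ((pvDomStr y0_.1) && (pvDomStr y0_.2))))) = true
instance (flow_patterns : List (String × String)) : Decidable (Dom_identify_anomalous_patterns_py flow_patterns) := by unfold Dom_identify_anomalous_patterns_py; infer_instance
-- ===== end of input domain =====

-- B drops A's Counter pass entirely: a flow is anomalous iff no OTHER entry has the same
-- string signature, decided by a direct pairwise (nested) scan — a different algorithm,
-- similar size, O(n^2) instead of A's O(n).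

-- ===== PORT A =====
-- str(pattern) on a str value is the value itself, so the signature is kv.2 unchanged.
def identify_anomalous_patterns_py (flow_patterns : List (String × String)) : List String :=
  let pattern_counts : PySem.Dict String Int :=
    flow_patterns.foldl (fun d kv => d.modify kv.2 0 (· + 1)) PySem.Dict.empty
  flow_patterns.foldl
    (fun anomalous kv =>
      if pattern_counts.getD kv.2 0 = 1 then anomalous ++ [kv.1] else anomalous) []

-- ===== PORT B =====
def identify_anomalous_patterns_py_alt (flow_patterns : List (String × String)) : List String :=
  let items := flow_patterns
  (PySem.List.enumerate items).foldl
    (fun anomalous ip =>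
      if !((PySem.List.enumerate items).any (fun jq => jq.1 != ip.1 && jq.2.2 == ip.2.2))
      then anomalous ++ [ip.2.1] else anomalous) []

-- ===== PRECONDITION & SPEC =====
def Spec_identify_anomalous_patterns_py (flow_patterns : List (String × String)) (out : List String) : Prop := out = identify_anomalous_patterns_py_alt flow_patterns
instance (flow_patterns : List (String × String)) (out : List String) : Decidable (Spec_identify_anomalous_patterns_py flow_patterns out) := by unfold Spec_identify_anomalous_patterns_py; infer_instance

-- ===== CLAIM =====
def Claim_equal_identify_anomalous_patterns_py : Prop := ∀ (flow_patterns : List (String × String)), Dom_identify_anomalous_patterns_py flow_patterns → Spec_identify_anomalous_patterns_py flow_patterns (identify_anomalous_patterns_py flow_patterns)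

-- ===== LEMMAS AND PROOFS =====

-- A's output in closed form: the entries whose signature is unique in the list, in order.
theorem pvA_closed (fp : List (String × String)) :
    identify_anomalous_patterns_py fp
      = (fp.filter (fun kv => decide ((fp.map Prod.snd).count kv.2 = 1))).map Prod.fst := by
  unfold identify_anomalous_patterns_py
  have hcnt : ∀ c, (fp.foldl (fun d kv => d.modify kv.2 0 (· + 1))
      (PySem.Dict.empty : PySem.Dict String Int)).getD c 0 = ((fp.map Prod.snd).count c : Int) := by
    intro c
    rw [← List.foldl_map (f := Prod.snd)
      (g := fun (d : PySem.Dict String Int) x => d.modify x 0 (· + 1))]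
    rw [PySem.Dict.getD_foldl_modify_add_one]
    simp
  have hif : (fun (anomalous : List String) (kv : String × String) =>
        if (fp.foldl (fun d kv => d.modify kv.2 0 (· + 1))
            (PySem.Dict.empty : PySem.Dict String Int)).getD kv.2 0 = 1
        then anomalous ++ [kv.1] else anomalous)
      = (fun anomalous kv =>
        if (decide ((fp.map Prod.snd).count kv.2 = 1)) = true
        then anomalous ++ [kv.1] else anomalous) := by
    funext acc kv
    rw [hcnt kv.2]
    by_cases h : (fp.map Prod.snd).count kv.2 = 1
    · simp [h]
    · have : ((fp.map Prod.snd).count kv.2 : Int) ≠ 1 := by exact_mod_cast h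
      simp [h, this]
  simp only [hif]
  rw [PySem.List.foldl_append_if]
  simp

-- B's output in closed form: the enumerated entries with no other index carrying the
-- same signature, projected to their flow ids.
theorem pvB_closed (fp : List (String × String)) :
    identify_anomalous_patterns_py_alt fp
      = ((PySem.List.enumerate fp).filter
          (fun ip => !((PySem.List.enumerate fp).any
              (fun jq => jq.1 != ip.1 && jq.2.2 == ip.2.2)))).map (fun ip => ip.2.1) := by
  unfold identify_anomalous_patterns_py_alt
  rw [PySem.List.foldl_append_if]
  simp

-- Two distinct members force length ≥ 2.
theorem pv_two_le_length {α : Type} {l : List α} {a b : α}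
    (ha : a ∈ l) (hb : b ∈ l) (hne : a ≠ b) : 2 ≤ l.length := by
  match l with
  | [] => cases ha
  | [x] =>
    simp at ha hb; exact absurd (ha.trans hb.symm) hne
  | x :: y :: t => simp

-- enumerate fp is duplicate-free (its indices strictly increase).
theorem pv_enum_nodup (fp : List (String × String)) :
    (PySem.List.enumerate fp 0).Nodup :=
  (PySem.List.pairwise_lt_enumerate fp 0).imp (fun h heq => by rw [heq] at h; omega)

-- an enumerated element is determined by its index
theorem pv_enum_inj {fp : List (String × String)} {ip jq : Int × (String × String)}
    (hip : ip ∈ PySem.List.enumerate fp 0) (hjq : jq ∈ PySem.List.enumerate fp 0)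
    (h : jq.1 = ip.1) : jq = ip := by
  rcases (PySem.List.mem_enumerate_iff _ _ _).1 hip with ⟨k, hk, rfl⟩
  rcases (PySem.List.mem_enumerate_iff _ _ _).1 hjq with ⟨m, hm, rfl⟩
  simp at h
  subst h; rfl

-- The pointwise equivalence: for an entry of the enumeration, "no other index has the
-- same signature" is exactly "its signature occurs once in the whole list".
theorem pv_pointwise (fp : List (String × String)) (ip : Int × (String × String))
    (hip : ip ∈ PySem.List.enumerate fp 0) :
    (!((PySem.List.enumerate fp 0).any (fun jq => jq.1 != ip.1 && jq.2.2 == ip.2.2)))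
      = decide ((fp.map Prod.snd).count ip.2.2 = 1) := by
  have hcount : (fp.map Prod.snd).count ip.2.2
      = (PySem.List.enumerate fp 0).countP (fun jq => jq.2.2 == ip.2.2) := by
    conv_lhs => rw [← PySem.List.map_snd_enumerate fp 0]
    rw [List.map_map, List.count_eq_countP, List.countP_map]
    rfl
  by_cases hex : ∃ jq ∈ PySem.List.enumerate fp 0, jq.1 ≠ ip.1 ∧ jq.2.2 = ip.2.2
  · -- another index shares the signature: any = true, count ≥ 2
    rcases hex with ⟨jq, hjqm, hne, hsig⟩
    have hany : (PySem.List.enumerate fp 0).any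
        (fun jq => jq.1 != ip.1 && jq.2.2 == ip.2.2) = true := by
      exact List.any_eq_true.2 ⟨jq, hjqm, by simp [hne, hsig]⟩
    have h2 : 2 ≤ (PySem.List.enumerate fp 0).countP (fun jq => jq.2.2 == ip.2.2) := by
      rw [List.countP_eq_length_filter]
      apply pv_two_le_length (a := ip) (b := jq)
      · exact List.mem_filter.2 ⟨hip, by simp⟩
      · exact List.mem_filter.2 ⟨hjqm, by simp [hsig]⟩
      · intro h; exact hne (by rw [h])
    rw [hany]
    have : (fp.map Prod.snd).count ip.2.2 ≠ 1 := by omega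
    simp [this]
  · -- no other index shares it: any = false, count = 1
    have hany : (PySem.List.enumerate fp 0).any
        (fun jq => jq.1 != ip.1 && jq.2.2 == ip.2.2) = false := by
      rw [List.any_eq_false]
      intro jq hjqm
      simp only [Bool.and_eq_true, bne_iff_ne, beq_iff_eq, not_and]
      intro hne hsig
      exact hex ⟨jq, hjqm, hne, hsig⟩
    have hcongr : (PySem.List.enumerate fp 0).countP (fun jq => jq.2.2 == ip.2.2)
        = (PySem.List.enumerate fp 0).countP (fun jq => jq == ip) := by
      apply List.countP_congr
      intro jq hjqm
      by_cases hj : jq = ip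
      · simp [hj]
      · have : jq.2.2 ≠ ip.2.2 := by
          intro hsig
          by_cases hidx : jq.1 = ip.1
          · exact hj (pv_enum_inj hip hjqm hidx)
          · exact hex ⟨jq, hjqm, hidx, hsig⟩
        simp [hj, this]
    have hone : (PySem.List.enumerate fp 0).countP (fun jq => jq == ip) = 1 := by
      rw [← List.count_eq_countP]
      exact List.count_eq_one_of_mem (pv_enum_nodup fp) hip
    rw [hany, hcount, hcongr, hone]
    simp

-- Filtering the enumeration by a predicate on the entry alone, then projecting the id,
-- is filtering the list itself (for any start index).
theorem pv_enum_filter (p : String × String → Bool) :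
    ∀ (fp : List (String × String)) (s : Int),
    ((PySem.List.enumerate fp s).filter (fun ip => p ip.2)).map (fun ip => ip.2.1)
      = (fp.filter p).map Prod.fst := by
  intro fp
  induction fp with
  | nil => intro s; rfl
  | cons x t ih =>
    intro s
    rw [PySem.List.enumerate_cons]
    by_cases hx : p x = true
    · rw [List.filter_cons_of_pos (by simpa using hx), List.filter_cons_of_pos hx]
      simp only [List.map_cons]
      rw [ih]
    · rw [List.filter_cons_of_neg (by simpa using hx), List.filter_cons_of_neg hx]
      exact ih _

-- ===== VERDICT =====
theorem identify_anomalous_patterns_py_spec : Claim_equal_identify_anomalous_patterns_py := by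
  intro fp _
  unfold Spec_identify_anomalous_patterns_py
  rw [pvA_closed, pvB_closed]
  rw [List.filter_congr (fun ip hip => pv_pointwise fp ip hip)]
  exact (pv_enum_filter (fun kv => decide ((fp.map Prod.snd).count kv.2 = 1)) fp 0).symm
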